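-- pv_equiv track=rewrite | github.com/Roberbg97/baseball_cubans_news_generation | code/notice_pipeline/generation.py | _get_list_players_text
-- ===== SOURCE A (Python) =====
-- def _get_list_players_text(players):
--     text = players[0]
--     for i in range(1, len(players)):
--         if i == len(players) - 1:
--             text += ' y ' + players[i]
--         else:
--             text += ', ' + players[i]
--
--     return text
-- ===== SOURCE B (Python) =====
-- def _get_list_players_text(players):
--     if len(players) == 1:
--         return players[0]
--     return ', '.join(players[:-1]) + ' y ' + players[-1]
-- ===== Notes on version B (the rewrite author's own statement) =====
-- stated objective: simpler
-- what changed: Replaces the indexed loop with its per-iteration last-position branch by a singleton early return plus ', '.join over players[:-1] concatenated with ' y ' and players[-1].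
import Mathlib
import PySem

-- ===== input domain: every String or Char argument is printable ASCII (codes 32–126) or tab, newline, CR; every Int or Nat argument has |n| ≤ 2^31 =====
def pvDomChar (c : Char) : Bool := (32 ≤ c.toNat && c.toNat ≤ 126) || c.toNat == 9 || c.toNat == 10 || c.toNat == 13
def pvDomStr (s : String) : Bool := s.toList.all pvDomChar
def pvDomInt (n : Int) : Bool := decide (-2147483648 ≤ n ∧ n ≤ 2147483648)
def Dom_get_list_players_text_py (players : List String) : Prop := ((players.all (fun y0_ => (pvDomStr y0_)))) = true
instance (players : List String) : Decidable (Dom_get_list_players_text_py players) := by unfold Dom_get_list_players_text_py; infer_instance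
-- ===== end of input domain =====

-- B replaces A's indexed loop (with its last-position branch each iteration) by a singleton
-- early return plus a ', '-join of the prefix concatenated with ' y ' and the last name (simpler).

-- ===== PORT A =====
def get_list_players_text_py (players : List String) : String :=
  let text := PySem.List.pyGetD players 0 ""
  (PySem.List.pyRange 1 (PySem.List.len players) 1).foldl
    (fun text i =>
      if i == PySem.List.len players - 1 then
        text ++ " y " ++ PySem.List.pyGetD players i ""
      else
        text ++ ", " ++ PySem.List.pyGetD players i "") text

-- ===== PORT B =====
def get_list_players_text_py_alt (players : List String) : String :=
  if PySem.List.len players == 1 then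
    PySem.List.pyGetD players 0 ""
  else
    PySem.Str.join ", " (PySem.List.slice players none (some (-1))) ++ " y "
      ++ PySem.List.pyGetD players (-1) ""

-- ===== PRECONDITION & SPEC =====
-- Pre_ excludes only the empty list, on which Python A raises IndexError (players[0]).
def Pre_get_list_players_text_py (players : List String) : Prop := players ≠ []
instance (players : List String) : Decidable (Pre_get_list_players_text_py players) := by unfold Pre_get_list_players_text_py; infer_instance
def pvWitness_get_list_players_text_py : List String := ["Luis", "Pedro"]

def Spec_get_list_players_text_py (players : List String) (out : String) : Prop := out = get_list_players_text_py_alt players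
instance (players : List String) (out : String) : Decidable (Spec_get_list_players_text_py players out) := by unfold Spec_get_list_players_text_py; infer_instance

-- ===== CLAIM (what is proved, stated in full; the proofs are below) =====
def Claim_equal_get_list_players_text_py : Prop := ∀ (players : List String), Dom_get_list_players_text_py players → Pre_get_list_players_text_py players → Spec_get_list_players_text_py players (get_list_players_text_py players)

-- ===== LEMMAS AND PROOFS =====

-- a fold with body 'a ++ sep ++ s' lets a prefix of the accumulator out
theorem foldl_sep_prefix (sep p : String) (xs : List String) (q : String) :
    xs.foldl (fun a s => a ++ sep ++ s) (p ++ q)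
      = p ++ xs.foldl (fun a s => a ++ sep ++ s) q := by
  induction xs generalizing q with
  | nil => rfl
  | cons x xs ih =>
    have h : (p ++ q) ++ sep ++ x = p ++ (q ++ sep ++ x) := by
      simp [String.append_assoc]
    rw [List.foldl_cons, List.foldl_cons, h]
    exact ih (q ++ sep ++ x)

-- ', '.join(h :: t) written as the fold A's loop performs over the tail.
theorem join_eq_foldl (sep h : String) (t : List String) :
    PySem.Str.join sep (h :: t) = t.foldl (fun a s => a ++ sep ++ s) h := by
  induction t generalizing h with
  | nil =>
    apply String.toList_inj.mp
    simp [PySem.Str.toList_join, PySem.Chars.join_singleton]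
  | cons x xs ih =>
    have hcc : PySem.Str.join sep (h :: x :: xs) = h ++ sep ++ PySem.Str.join sep (x :: xs) := by
      apply String.toList_inj.mp
      simp [PySem.Str.toList_join, PySem.Chars.join_cons_cons, String.append_assoc]
    rw [hcc, ih, List.foldl_cons, ← foldl_sep_prefix sep (h ++ sep) xs x]

-- ===== VERDICT (by name: the statement is the Claim_ definition above) =====
theorem get_list_players_text_py_spec : Claim_equal_get_list_players_text_py := by
  intro players _ hpre
  unfold Spec_get_list_players_text_py
  obtain ⟨xs, last, rfl⟩ := players.eq_nil_or_concat.resolve_left hpre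
  simp only [List.concat_eq_append]
  cases xs with
  | nil =>
    simp [get_list_players_text_py, get_list_players_text_py_alt, PySem.List.len,
      PySem.List.pyRange_one_eq_nil, PySem.List.pyGetD_zero_cons]
  | cons h t =>
    have hlen : PySem.List.len ((h :: t) ++ [last]) = ((h :: t).length : Int) + 1 := by
      simp [PySem.List.len]
    have hone : ¬ (PySem.List.len ((h :: t) ++ [last]) == 1) = true := by
      rw [hlen]; simp only [List.length_cons, beq_iff_eq]; omega
    have hrange : PySem.List.pyRange 1 (((h :: t).length : Int) + 1) 1
        = PySem.List.pyRange 1 ((h :: t).length : Int) 1 ++ [((h :: t).length : Int)] := by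
      exact PySem.List.pyRange_one_succ_right (by simp)
    have hmid : ∀ (acc : String), ∀ i ∈ PySem.List.pyRange 1 ((h :: t).length : Int) 1,
        (if i == ((h :: t).length : Int) then
          acc ++ " y " ++ PySem.List.pyGetD ((h :: t) ++ [last]) i ""
        else acc ++ ", " ++ PySem.List.pyGetD ((h :: t) ++ [last]) i "")
          = acc ++ ", " ++ PySem.List.pyGetD (h :: t) i "" := by
      intro acc i hi
      rw [PySem.List.mem_pyRange_one] at hi
      obtain ⟨hi1, hi2⟩ := hi
      simp only [List.length_cons] at hi2
      have h0 : (0 : Int) ≤ i := by omega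
      have hne : ¬ (i == ((h :: t).length : Int)) = true := by
        simp only [List.length_cons, beq_iff_eq]; push_cast; omega
      rw [if_neg hne]
      congr 1
      rw [PySem.List.pyGetD_eq_getElem _ _ h0 (by simp only [List.length_append, List.length_cons, Nat.cast_add, Nat.cast_one]; omega),
          PySem.List.pyGetD_eq_getElem _ _ h0 (by simp only [List.length_cons]; omega)]
      exact List.getElem_append_left (by simp only [List.length_cons]; omega)
    have hlast : PySem.List.pyGetD ((h :: t) ++ [last]) (((h :: t).length : Nat) : Int) ""
        = last := by
      rw [PySem.List.pyGetD_natCast]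
      simp
    have hinit : PySem.List.pyGetD ((h :: t) ++ [last]) 0 "" = h := by
      simp [PySem.List.pyGetD_zero_cons]
    have hfold := PySem.List.foldl_pyRange_pyGetD (h :: t) ""
        (fun a s => a ++ ", " ++ s) h (a := 1) (by omega)
    unfold get_list_players_text_py get_list_players_text_py_alt
    rw [if_neg hone, hinit, hlen]
    simp only [add_sub_cancel_right]
    rw [hrange, List.foldl_append,
        PySem.List.foldl_congr_mem _ _ _ _ hmid]
    simp only [List.foldl_cons, List.foldl_nil]
    rw [if_pos (by simp), hlast]
    have hlen2 : PySem.List.len (h :: t) = ((h :: t).length : Int) := by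
      simp [PySem.List.len]
    rw [← hlen2] at *
    rw [hfold]
    rw [PySem.List.slice_to_neg_one, List.dropLast_concat,
        PySem.List.pyGetD_neg_one_append_singleton, join_eq_foldl]
    rfl
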